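-- pv_equiv track=rewrite | github.com/lisskor/few-nerd-prompting | few_nerd_prompting/prompt_building_utils.py | make_output_example
-- ===== SOURCE A (Python) =====
-- from typing import List, Tuple, Iterator
--
-- TAG_START = "@@"
--
-- TAG_END = "##"
--
-- def make_output_example(sentence: List[str], labels: List[str], entity_class: str) -> str:
--     """
--     Add entity start and end tags to the input text to obtain an output example (for a single entity class at a time).
--     E.g. sentence = ["I", "am", "in", "Tallinn", "."],
--          labels = ["O", "O", "O", "location", "O"],
--          entity_class = "location"
--     -> 'I am in @@Tallinn## .'
--
--     :param sentence: list of tokens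
--     :param labels: list of token labels
--     :param entity_class: entity class (e.g. "person", "location" etc.)
--     :return: output text with tags around the entities belonging to the class in question
--     """
--     sentence_list = []
--     # Keep track of whether we are currently writing an entity that needs to be marked
--     entity_in_progress = False
--     for w, l in zip(sentence, labels):
--         if l.startswith(entity_class):
--             # First token of entity: add with TAG_START
--             if not entity_in_progress:
--                 sentence_list.append(f"{TAG_START}{w}")
--                 entity_in_progress = True
--             # Second, third, etc. tokens of entity: add token only
--             else:
--                 sentence_list.append(w)
--         else:
--             # If current entity just ended, modify the last added token to include TAG_END
--             if entity_in_progress: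
--                 sentence_list[-1] = f"{sentence_list[-1]}{TAG_END}"
--                 entity_in_progress = False
--             # Then add current non-entity token
--             sentence_list.append(w)
--     return ' '.join(sentence_list)
-- ===== SOURCE B (Python) =====
-- TAG_START = "@@"
-- TAG_END = "##"
--
-- def make_output_example(sentence, labels, entity_class):
--     pairs = list(zip(sentence, labels))
--     flags = [l.startswith(entity_class) for _, l in pairs]
--     prevs = [False] + flags[:-1]
--     nexts = flags[1:] + [False]
--     tokens = [
--         (TAG_START if f and not p else "") + w + (TAG_END if f and not nx else "")
--         for (w, _), f, p, nx in zip(pairs, flags, prevs, nexts)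
--     ]
--     return " ".join(tokens)
-- ===== Notes on version B (the rewrite author's own statement) =====
-- stated objective: alternative
-- what changed: Replaces A's carried entity_in_progress flag and its retroactive append of TAG_END to the previously emitted token with zipped previous/next flag lists, so each token is built in one shot from its neighbours' labels.
-- intended difference: When the last zipped token belongs to the entity class, A leaves the trailing entity unclosed (no TAG_END, an unbalanced tag), while B closes it with TAG_END, which is the intended balanced output. — e.g. on make_output_example(["in", "Tallinn"], ["O", "location"], "location"): A returns "in @@Tallinn", B returns "in @@Tallinn##"
import Mathlib
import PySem

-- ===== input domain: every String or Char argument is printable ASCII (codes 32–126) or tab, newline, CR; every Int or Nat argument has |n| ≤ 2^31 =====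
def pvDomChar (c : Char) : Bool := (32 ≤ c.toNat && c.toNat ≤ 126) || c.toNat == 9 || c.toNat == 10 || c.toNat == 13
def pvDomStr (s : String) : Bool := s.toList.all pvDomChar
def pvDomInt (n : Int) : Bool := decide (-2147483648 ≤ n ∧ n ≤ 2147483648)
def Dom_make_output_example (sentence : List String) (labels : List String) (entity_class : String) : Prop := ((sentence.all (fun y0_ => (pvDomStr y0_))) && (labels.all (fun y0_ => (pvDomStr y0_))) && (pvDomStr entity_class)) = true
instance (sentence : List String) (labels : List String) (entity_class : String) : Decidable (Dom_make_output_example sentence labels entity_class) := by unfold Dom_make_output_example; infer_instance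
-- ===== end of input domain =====

-- B replaces A's carried entity_in_progress flag (with its retroactive patch of the
-- previously appended token) by zipped previous/next flag lists, building each tagged
-- token in one shot; objective: alternative decomposition, same O(n) cost.
-- On a sentence whose last zipped token is an entity, B (intentionally) closes the
-- trailing entity with TAG_END where A leaves it unclosed — see D_ below.

-- l.startswith(entity_class), shared by both ports
def pvFlag (ec : String) (wl : String × String) : Bool := PySem.Str.startswith wl.2 ec

-- ===== PORT A =====
-- Python: sentence_list[-1] = f"{sentence_list[-1]}{TAG_END}" (append TAG_END to the last
-- element; A only reaches this with a nonempty list, so the [] case is unreachable).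
def pvCloseLast : List String → List String
  | [] => []
  | [x] => [x ++ "##"]
  | x :: y :: xs => x :: pvCloseLast (y :: xs)

-- the loop body of A: state = (sentence_list, entity_in_progress)
def pvStepA (ec : String) (st : List String × Bool) (wl : String × String) : List String × Bool :=
  if pvFlag ec wl then
    if !st.2 then (st.1 ++ ["@@" ++ wl.1], true)
    else (st.1 ++ [wl.1], true)
  else
    if st.2 then (pvCloseLast st.1 ++ [wl.1], false)
    else (st.1 ++ [wl.1], false)

def make_output_example (sentence : List String) (labels : List String) (entity_class : String) : String :=
  PySem.Str.join " " (((sentence.zip labels).foldl (pvStepA entity_class) ([], false)).1)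

-- ===== PORT B =====
def make_output_example_alt (sentence : List String) (labels : List String) (entity_class : String) : String :=
  let pairs := sentence.zip labels
  let flags := pairs.map (pvFlag entity_class)
  let prevs := false :: flags.dropLast
  let nexts := flags.tail ++ [false]
  let tokens := ((pairs.zip flags).zip (prevs.zip nexts)).map
    (fun x => ((if x.1.2 && !x.2.1 then "@@" else "") ++ x.1.1.1) ++ (if x.1.2 && !x.2.2 then "##" else ""))
  PySem.Str.join " " tokens

-- ===== PRECONDITION & SPEC =====
-- When the last zipped token belongs to the entity class, A returns the sentence with
-- the trailing entity unclosed (no TAG_END, unbalanced tags) while B closes it with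
-- TAG_END; B's balanced output is the intended one.
def D_make_output_example (sentence : List String) (labels : List String) (entity_class : String) : Prop :=
  (((sentence.zip labels).getLast?.map (fun wl => PySem.Str.startswith wl.2 entity_class)).getD false) = true
instance (sentence : List String) (labels : List String) (entity_class : String) : Decidable (D_make_output_example sentence labels entity_class) := by unfold D_make_output_example; infer_instance

def Spec_make_output_example (sentence : List String) (labels : List String) (entity_class : String) (out : String) : Prop := ¬ D_make_output_example sentence labels entity_class → out = make_output_example_alt sentence labels entity_class
instance (sentence : List String) (labels : List String) (entity_class : String) (out : String) : Decidable (Spec_make_output_example sentence labels entity_class out) := by unfold Spec_make_output_example; infer_instance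

def pvDiffWitness_make_output_example : List String × List String × String := (["in", "Tallinn"], ["O", "location"], "location")
def pvDiffWitnessOut_make_output_example : String × String := ("in @@Tallinn", "in @@Tallinn##")

-- ===== CLAIM (what is proved, stated in full; the proofs are below) =====
def Claim_unchanged_make_output_example : Prop := ∀ (sentence : List String) (labels : List String) (entity_class : String), Dom_make_output_example sentence labels entity_class → Spec_make_output_example sentence labels entity_class (make_output_example sentence labels entity_class)
def Claim_changed_make_output_example : Prop := Dom_make_output_example (pvDiffWitness_make_output_example.1) (pvDiffWitness_make_output_example.2.1) (pvDiffWitness_make_output_example.2.2) ∧ D_make_output_example (pvDiffWitness_make_output_example.1) (pvDiffWitness_make_output_example.2.1) (pvDiffWitness_make_output_example.2.2) ∧ make_output_example (pvDiffWitness_make_output_example.1) (pvDiffWitness_make_output_example.2.1) (pvDiffWitness_make_output_example.2.2) = pvDiffWitnessOut_make_output_example.1 ∧ make_output_example_alt (pvDiffWitness_make_output_example.1) (pvDiffWitness_make_output_example.2.1) (pvDiffWitness_make_output_example.2.2) = pvDiffWitnessOut_make_output_example.2 ∧ pvDiffWitnessOut_make_output_example.1 ≠ pvDiffWitnessOut_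make_output_example.2
def Claim_exact_make_output_example : Prop := ∀ (sentence : List String) (labels : List String) (entity_class : String), Dom_make_output_example sentence labels entity_class → D_make_output_example sentence labels entity_class → make_output_example sentence labels entity_class ≠ make_output_example_alt sentence labels entity_class

-- ===== LEMMAS AND PROOFS =====

-- A's effective next-flag: at the end of the list a pending entity stays OPEN
def pvNextA (ec : String) : List (String × String) → Bool
  | [] => true
  | wl :: _ => pvFlag ec wl

-- B's next-flag: at the end of the list the entity is CLOSED
def pvNextB (ec : String) : List (String × String) → Bool
  | [] => false
  | wl :: _ => pvFlag ec wl

-- A's tokens in neighbor-decided form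
def pvAtoks (ec : String) (prev : Bool) : List (String × String) → List String
  | [] => []
  | wl :: rest =>
    (((if pvFlag ec wl && !prev then "@@" else "") ++ wl.1) ++
      (if pvFlag ec wl && !pvNextA ec rest then "##" else ""))
    :: pvAtoks ec (pvFlag ec wl) rest

-- B's tokens in neighbor-decided form
def pvBtoks (ec : String) (prev : Bool) : List (String × String) → List String
  | [] => []
  | wl :: rest =>
    (((if pvFlag ec wl && !prev then "@@" else "") ++ wl.1) ++
      (if pvFlag ec wl && !pvNextB ec rest then "##" else ""))
    :: pvBtoks ec (pvFlag ec wl) rest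

-- flag of the last pair (false for the empty list)
def pvLastFlag (ec : String) : List (String × String) → Bool
  | [] => false
  | [wl] => pvFlag ec wl
  | _ :: y :: ys => pvLastFlag ec (y :: ys)

theorem pvCloseLast_append_singleton (acc : List String) (t : String) :
    pvCloseLast (acc ++ [t]) = acc ++ [t ++ "##"] := by
  induction acc with
  | nil => rfl
  | cons x xs ih =>
    cases xs with
    | nil => simp [pvCloseLast]
    | cons y ys => simpa [pvCloseLast] using ih

-- A's loop invariant: the final sentence_list is acc (closed if the pending entity
-- ends at the head of rest) followed by the neighbor-decided tokens of rest.
theorem pvFoldA_eq (ec : String) (rest : List (String × String)) :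
    ∀ (acc : List String) (b : Bool),
    (rest.foldl (pvStepA ec) (acc, b)).1 =
      (if b && !pvNextA ec rest then pvCloseLast acc else acc) ++ pvAtoks ec b rest := by
  induction rest with
  | nil => intro acc b; simp [pvAtoks, pvNextA]
  | cons x rs ih =>
    intro acc b
    simp only [List.foldl_cons, pvStepA]
    have hnx : pvNextA ec (x :: rs) = pvFlag ec x := rfl
    cases hx : pvFlag ec x with
    | true =>
      cases b with
      | false =>
        rw [if_pos rfl, if_pos (show (!false) = true from rfl), ih]
        cases hn : pvNextA ec rs <;>
          simp [pvAtoks, hnx, hx, hn, pvCloseLast_append_singleton]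
      | true =>
        rw [if_pos rfl, if_neg (show ¬ (!true) = true from by simp), ih]
        cases hn : pvNextA ec rs <;>
          simp [pvAtoks, hnx, hx, hn, pvCloseLast_append_singleton]
    | false =>
      rw [if_neg (show ¬ false = true from by simp)]
      cases b with
      | false =>
        rw [if_neg (show ¬ false = true from by simp), ih]
        simp [pvAtoks, hnx, hx]
      | true =>
        rw [if_pos rfl, ih]
        simp [pvAtoks, hnx, hx]

-- B's zipped prev/next construction equals the neighbor-decided form with closed end.
theorem pvB_eq (ec : String) (ps : List (String × String)) :
    ∀ (p : Bool),
    ((ps.zip (ps.map (pvFlag ec))).zip ((p :: (ps.map (pvFlag ec)).dropLast).zip ((ps.map (pvFlag ec)).tail ++ [false]))).map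
      (fun x => ((if x.1.2 && !x.2.1 then "@@" else "") ++ x.1.1.1) ++ (if x.1.2 && !x.2.2 then "##" else ""))
    = pvBtoks ec p ps := by
  induction ps with
  | nil => intro p; rfl
  | cons x rs ih =>
    intro p
    cases rs with
    | nil => simp [pvBtoks, pvNextB]
    | cons y ys =>
      simp only [List.map_cons, List.dropLast_cons₂, List.tail_cons, List.cons_append,
        List.zip_cons_cons, List.map_cons]
      rw [show pvBtoks ec p (x :: y :: ys) =
        (((if pvFlag ec x && !p then "@@" else "") ++ x.1) ++
          (if pvFlag ec x && !pvFlag ec y then "##" else "")) :: pvBtoks ec (pvFlag ec x) (y :: ys)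
        from rfl]
      refine congrArg₂ _ rfl ?_
      simpa using ih (pvFlag ec x)

-- Relation between the two token lists: B closes the trailing entity, A does not.
theorem pvBtoks_eq_Atoks (ec : String) (ps : List (String × String)) :
    ∀ (p : Bool),
    pvBtoks ec p ps = if pvLastFlag ec ps then pvCloseLast (pvAtoks ec p ps) else pvAtoks ec p ps := by
  induction ps with
  | nil => intro p; rfl
  | cons x rs ih =>
    intro p
    cases rs with
    | nil =>
      cases hx : pvFlag ec x <;>
        simp [pvBtoks, pvAtoks, pvNextA, pvNextB, pvLastFlag, pvCloseLast, hx]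
    | cons y ys =>
      have hL : pvLastFlag ec (x :: y :: ys) = pvLastFlag ec (y :: ys) := rfl
      have hA : pvAtoks ec p (x :: y :: ys) =
          (((if pvFlag ec x && !p then "@@" else "") ++ x.1) ++
            (if pvFlag ec x && !pvFlag ec y then "##" else "")) :: pvAtoks ec (pvFlag ec x) (y :: ys) := rfl
      have hB : pvBtoks ec p (x :: y :: ys) =
          (((if pvFlag ec x && !p then "@@" else "") ++ x.1) ++
            (if pvFlag ec x && !pvFlag ec y then "##" else "")) :: pvBtoks ec (pvFlag ec x) (y :: ys) := rfl
      rw [hA, hB, hL, ih (pvFlag ec x)]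
      cases hn : pvLastFlag ec (y :: ys) with
      | false => simp
      | true =>
        have : pvAtoks ec (pvFlag ec x) (y :: ys) ≠ [] := by
          simp [pvAtoks]
        cases hAy : pvAtoks ec (pvFlag ec x) (y :: ys) with
        | nil => exact absurd hAy this
        | cons a as => simp [pvCloseLast]

-- the last flag equals the D_ condition
theorem pvLastFlag_eq_getLast? (ec : String) (ps : List (String × String)) :
    pvLastFlag ec ps = ((ps.getLast?.map (fun wl => pvFlag ec wl)).getD false) := by
  induction ps with
  | nil => rfl
  | cons x rs ih =>
    cases rs with
    | nil => rfl
    | cons y ys =>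
      rw [show pvLastFlag ec (x :: y :: ys) = pvLastFlag ec (y :: ys) from rfl, ih]
      simp

theorem pvA_closed (sentence labels : List String) (ec : String) :
    make_output_example sentence labels ec =
      PySem.Str.join " " (pvAtoks ec false (sentence.zip labels)) := by
  unfold make_output_example
  rw [pvFoldA_eq]
  simp

theorem pvB_closed (sentence labels : List String) (ec : String) :
    make_output_example_alt sentence labels ec =
      PySem.Str.join " " (pvBtoks ec false (sentence.zip labels)) := by
  show PySem.Str.join " "
      ((((sentence.zip labels).zip ((sentence.zip labels).map (pvFlag ec))).zip
          ((false :: ((sentence.zip labels).map (pvFlag ec)).dropLast).zip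
            (((sentence.zip labels).map (pvFlag ec)).tail ++ [false]))).map
        (fun x => ((if x.1.2 && !x.2.1 then "@@" else "") ++ x.1.1.1) ++ (if x.1.2 && !x.2.2 then "##" else ""))) = _
  rw [pvB_eq]

-- join length grows by 2 when the last token gains "##"
theorem pvJoin_closeLast_len (l : List String) (h : l ≠ []) :
    (PySem.Str.join " " (pvCloseLast l)).toList.length = (PySem.Str.join " " l).toList.length + 2 := by
  induction l with
  | nil => exact absurd rfl h
  | cons x xs ih =>
    cases xs with
    | nil =>
      simp [pvCloseLast, PySem.Str.toList_join, PySem.Chars.join_singleton]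
    | cons y ys =>
      have hstep : ∀ (a b : String) (r : List String),
          (PySem.Str.join " " (a :: b :: r)).toList.length =
            a.toList.length + 1 + (PySem.Str.join " " (b :: r)).toList.length := by
        intro a b r
        simp [PySem.Str.toList_join, PySem.Chars.join_cons_cons]
        omega
      have hrec : pvCloseLast (x :: y :: ys) = x :: pvCloseLast (y :: ys) := rfl
      rw [hrec]
      have hcl : ∃ b r, pvCloseLast (y :: ys) = b :: r := by
        cases ys with
        | nil => exact ⟨_, _, rfl⟩
        | cons z zs => exact ⟨_, _, rfl⟩
      obtain ⟨b, r, hbr⟩ := hcl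
      rw [hbr, hstep, ← hbr, ih (by simp), hstep]
      omega

-- ===== VERDICT (by name: the statement is the Claim_ definition above) =====
theorem make_output_example_spec : Claim_unchanged_make_output_example := by
  intro sentence labels ec _ hD
  rw [pvA_closed, pvB_closed, pvBtoks_eq_Atoks]
  have : pvLastFlag ec (sentence.zip labels) = false := by
    rw [pvLastFlag_eq_getLast?]
    unfold D_make_output_example at hD
    unfold pvFlag
    exact Bool.eq_false_iff.mpr (fun hc => hD hc)
  rw [this]
  simp

theorem make_output_example_changed : Claim_changed_make_output_example := by
  unfold Claim_changed_make_output_example; decide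

theorem make_output_example_tight : Claim_exact_make_output_example := by
  intro sentence labels ec _ hD
  rw [pvA_closed, pvB_closed, pvBtoks_eq_Atoks]
  have hlast : pvLastFlag ec (sentence.zip labels) = true := by
    rw [pvLastFlag_eq_getLast?]
    unfold D_make_output_example at hD
    unfold pvFlag
    exact hD
  rw [hlast, if_pos rfl]
  have hne : (sentence.zip labels) ≠ [] := by
    intro h; rw [h] at hlast; simp [pvLastFlag] at hlast
  have hAne : pvAtoks ec false (sentence.zip labels) ≠ [] := by
    cases h : (sentence.zip labels) with
    | nil => exact absurd h hne
    | cons a as => simp [pvAtoks]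
  intro heq
  have := pvJoin_closeLast_len (pvAtoks ec false (sentence.zip labels)) hAne
  rw [← heq] at this
  simp at this
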